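-- pv_equiv track=rewrite | github.com/cloudQuant/backtrader_web | scripts/validate_docker_env.py | validate_secret_values
-- ===== SOURCE A (Python) =====
-- DEFAULT_SECRET_VALUES = {
--     "your-secret-key-change-in-production",
--     "your-jwt-secret-change-in-production",
-- }
--
-- DEFAULT_ADMIN_PASSWORDS = {"admin123", "password", "12345678"}
--
-- def validate_secret_values(values: dict[str, str]) -> tuple[list[str], list[str]]:
--     errors: list[str] = []
--     warnings: list[str] = []
--     debug_enabled = values.get("DEBUG", "false").strip().lower() in {"1", "true", "yes", "on"}
--     for key in ("SECRET_KEY", "JWT_SECRET_KEY"):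
--         value = values.get(key, "")
--         if value in DEFAULT_SECRET_VALUES:
--             message = f"{key} still uses default placeholder value"
--             if debug_enabled:
--                 warnings.append(message)
--             else:
--                 errors.append(message)
--         if len(value) < 32:
--             message = f"{key} should be at least 32 characters long"
--             if debug_enabled:
--                 warnings.append(message)
--             else:
--                 errors.append(message)
--     admin_password = values.get("ADMIN_PASSWORD", "")
--     if admin_password in DEFAULT_ADMIN_PASSWORDS:
--         message = "ADMIN_PASSWORD still uses an insecure default value"
--         if debug_enabled:
--             warnings.append(message)
--         else:
--             errors.append(message)
--     return errors, warnings
-- ===== SOURCE B (Python) =====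
-- DEFAULT_SECRET_VALUES = {
--     "your-secret-key-change-in-production",
--     "your-jwt-secret-change-in-production",
-- }
--
-- DEFAULT_ADMIN_PASSWORDS = {"admin123", "password", "12345678"}
--
-- # Declarative rule table: (config key, violation predicate, message).
-- _RULES = [
--     ("SECRET_KEY", lambda v: v in DEFAULT_SECRET_VALUES,
--      "SECRET_KEY still uses default placeholder value"),
--     ("SECRET_KEY", lambda v: len(v) < 32,
--      "SECRET_KEY should be at least 32 characters long"),
--     ("JWT_SECRET_KEY", lambda v: v in DEFAULT_SECRET_VALUES,
--      "JWT_SECRET_KEY still uses default placeholder value"),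
--     ("JWT_SECRET_KEY", lambda v: len(v) < 32,
--      "JWT_SECRET_KEY should be at least 32 characters long"),
--     ("ADMIN_PASSWORD", lambda v: v in DEFAULT_ADMIN_PASSWORDS,
--      "ADMIN_PASSWORD still uses an insecure default value"),
-- ]
--
-- def validate_secret_values(values: dict[str, str]) -> tuple[list[str], list[str]]:
--     messages = [msg for key, bad, msg in _RULES if bad(values.get(key, ""))]
--     if values.get("DEBUG", "false").strip().lower() in {"1", "true", "yes", "on"}:
--         return [], messages
--     return messages, []
-- ===== Notes on version B (the rewrite author's own statement) =====
-- stated objective: simpler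
-- what changed: B is table-driven: a declarative list of (key, predicate, message) rules evaluated by one comprehension, then a single final partition on debug, replacing A's hard-coded sequential checks with per-check errors/warnings branching.
import Mathlib
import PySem

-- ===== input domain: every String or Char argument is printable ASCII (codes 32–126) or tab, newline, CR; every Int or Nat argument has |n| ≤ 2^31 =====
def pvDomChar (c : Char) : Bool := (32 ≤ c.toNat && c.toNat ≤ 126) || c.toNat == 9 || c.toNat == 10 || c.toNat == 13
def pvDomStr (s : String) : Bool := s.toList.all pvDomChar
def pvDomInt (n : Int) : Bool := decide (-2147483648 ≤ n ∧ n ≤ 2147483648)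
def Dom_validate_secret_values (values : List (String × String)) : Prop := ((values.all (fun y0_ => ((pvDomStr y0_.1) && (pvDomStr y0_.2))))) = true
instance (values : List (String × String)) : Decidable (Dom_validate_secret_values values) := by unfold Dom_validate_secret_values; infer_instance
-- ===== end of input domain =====

-- B replaces A's hard-coded checks with a declarative rule table filtered in one pass,
-- partitioning once on debug at the end (objective: simpler).

-- ===== PORT A =====
def pvDefaultSecretValues : List String :=
  ["your-secret-key-change-in-production", "your-jwt-secret-change-in-production"]

def pvDefaultAdminPasswords : List String := ["admin123", "password", "12345678"]

def validate_secret_values (values : List (String × String)) : List String × List String :=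
  let errors : List String := []
  let warnings : List String := []
  let debug_enabled : Bool :=
    ["1", "true", "yes", "on"].contains
      (PySem.Str.lower (PySem.Str.strip ((PySem.Dict.mk values).getD "DEBUG" "false")))
  let st :=
    (["SECRET_KEY", "JWT_SECRET_KEY"] : List String).foldl
      (fun (st : List String × List String) key =>
        let errors := st.1
        let warnings := st.2
        let value := (PySem.Dict.mk values).getD key ""
        let st :=
          if pvDefaultSecretValues.contains value then
            let message := key ++ " still uses default placeholder value"
            if debug_enabled then (errors, warnings ++ [message])
            else (errors ++ [message], warnings)
          else (errors, warnings)
        if PySem.Str.len value < 32 then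
          let message := key ++ " should be at least 32 characters long"
          if debug_enabled then (st.1, st.2 ++ [message])
          else (st.1 ++ [message], st.2)
        else st)
      (errors, warnings)
  let admin_password := (PySem.Dict.mk values).getD "ADMIN_PASSWORD" ""
  if pvDefaultAdminPasswords.contains admin_password then
    let message := "ADMIN_PASSWORD still uses an insecure default value"
    if debug_enabled then (st.1, st.2 ++ [message]) else (st.1 ++ [message], st.2)
  else st

-- ===== PORT B =====
-- the declarative rule table: (config key, violation predicate, message)
def pvRules : List (String × (String → Bool) × String) :=
  [("SECRET_KEY", fun v => pvDefaultSecretValues.contains v,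
      "SECRET_KEY still uses default placeholder value"),
   ("SECRET_KEY", fun v => decide (PySem.Str.len v < 32),
      "SECRET_KEY should be at least 32 characters long"),
   ("JWT_SECRET_KEY", fun v => pvDefaultSecretValues.contains v,
      "JWT_SECRET_KEY still uses default placeholder value"),
   ("JWT_SECRET_KEY", fun v => decide (PySem.Str.len v < 32),
      "JWT_SECRET_KEY should be at least 32 characters long"),
   ("ADMIN_PASSWORD", fun v => pvDefaultAdminPasswords.contains v,
      "ADMIN_PASSWORD still uses an insecure default value")]

def validate_secret_values_alt (values : List (String × String)) : List String × List String :=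
  let messages :=
    (pvRules.filter (fun r => r.2.1 ((PySem.Dict.mk values).getD r.1 ""))).map (fun r => r.2.2)
  if ["1", "true", "yes", "on"].contains
      (PySem.Str.lower (PySem.Str.strip ((PySem.Dict.mk values).getD "DEBUG" "false"))) then
    ([], messages)
  else (messages, [])

-- ===== PRECONDITION & SPEC =====
def Spec_validate_secret_values (values : List (String × String)) (out : List String × List String) : Prop := out = validate_secret_values_alt values
instance (values : List (String × String)) (out : List String × List String) : Decidable (Spec_validate_secret_values values out) := by unfold Spec_validate_secret_values; infer_instance

-- ===== CLAIM (what is proved, stated in full; the proofs are below) =====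
def Claim_equal_validate_secret_values : Prop := ∀ (values : List (String × String)), Dom_validate_secret_values values → Spec_validate_secret_values values (validate_secret_values values)

-- ===== LEMMAS AND PROOFS =====

-- ===== VERDICT (by name: the statement is the Claim_ definition above) =====
set_option maxHeartbeats 2000000 in
theorem validate_secret_values_spec : Claim_equal_validate_secret_values := by
  intro values _
  unfold Spec_validate_secret_values validate_secret_values validate_secret_values_alt pvRules
  simp only [List.foldl_cons, List.foldl_nil, List.filter_cons, List.filter_nil, decide_eq_true_eq]
  split_ifs <;> simp_all
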